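-- pv_equiv track=rewrite | github.com/Nightbro/DiscordBots | echo-bot/utils/intro_config.py | canonicalize_days
-- ===== SOURCE A (Python) =====
-- _DAYS = ['mon', 'tue', 'wed', 'thu', 'fri', 'sat', 'sun']
--
-- def canonicalize_days(days: list[str]) -> list[str]:
--     """Return days sorted in week order (mon→sun), deduped."""
--     seen = set()
--     out = []
--     for d in _DAYS:
--         if d in days and d not in seen:
--             seen.add(d)
--             out.append(d)
--     return out
-- ===== SOURCE B (Python) =====
-- _DAYS = ['mon', 'tue', 'wed', 'thu', 'fri', 'sat', 'sun']
-- _ORDER = {d: i for i, d in enumerate(_DAYS)}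
--
-- def canonicalize_days(days: list[str]) -> list[str]:
--     """Return days sorted in week order (mon->sun), deduped."""
--     valid = {d for d in days if d in _ORDER}
--     return sorted(valid, key=_ORDER.get)
-- ===== Notes on version B (the rewrite author's own statement) =====
-- stated objective: idiomatic
-- what changed: Instead of scanning the canonical week list with a membership test against the input, B collects the input's valid days into a set via a rank map built once and returns sorted(valid, key=rank), i.e. filter-and-sort over the input rather than a fixed scan over _DAYS.
import Mathlib
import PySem

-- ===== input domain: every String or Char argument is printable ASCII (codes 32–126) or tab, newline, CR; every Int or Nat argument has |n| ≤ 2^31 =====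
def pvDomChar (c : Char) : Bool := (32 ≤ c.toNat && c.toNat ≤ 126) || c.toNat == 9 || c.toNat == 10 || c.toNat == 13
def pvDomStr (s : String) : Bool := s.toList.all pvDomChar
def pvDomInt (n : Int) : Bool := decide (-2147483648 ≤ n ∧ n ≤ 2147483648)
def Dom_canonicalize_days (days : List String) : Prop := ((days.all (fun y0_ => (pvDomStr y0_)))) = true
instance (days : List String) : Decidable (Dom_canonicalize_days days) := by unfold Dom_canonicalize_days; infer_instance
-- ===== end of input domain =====

-- B filters the input against a rank map and sorts by rank instead of scanning the canonical week list (objective: idiomatic).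

-- ===== PORT A =====
def pv_DAYS : List String := ["mon", "tue", "wed", "thu", "fri", "sat", "sun"]

def canonicalize_days (days : List String) : List String :=
  (pv_DAYS.foldl (fun (st : PySem.Set String × List String) d =>
      if days.contains d && !(PySem.Set.contains st.1 d)
      then (PySem.Set.add st.1 d, st.2 ++ [d])
      else st) (PySem.Set.empty, [])).2

-- ===== PORT B =====
-- module-level _ORDER = {d: i for i, d in enumerate(_DAYS)}
def pv_ORDER : PySem.Dict String Int :=
  (PySem.List.enumerate pv_DAYS).foldl (fun d p => d.insert p.2 p.1) PySem.Dict.empty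

def canonicalize_days_alt (days : List String) : List String :=
  let valid : PySem.Set String := PySem.Set.ofList (days.filter (fun d => pv_ORDER.contains d))
  -- key=_ORDER.get; every element of valid is a key of _ORDER, so .get is an Int here (ported as getD _ 0)
  PySem.List.sorted valid (fun d => pv_ORDER.getD d 0) false

-- ===== PRECONDITION & SPEC =====
def Spec_canonicalize_days (days : List String) (out : List String) : Prop := out = canonicalize_days_alt days
instance (days : List String) (out : List String) : Decidable (Spec_canonicalize_days days out) := by unfold Spec_canonicalize_days; infer_instance

-- ===== CLAIM (what is proved, stated in full; the proofs are below) =====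
def Claim_equal_canonicalize_days : Prop := ∀ (days : List String), Dom_canonicalize_days days → Spec_canonicalize_days days (canonicalize_days days)

-- ===== LEMMAS AND PROOFS =====

-- both programs compute the week-ordered filter of the input
def pvTarget (days : List String) : List String := pv_DAYS.filter (fun d => days.contains d)

lemma foldA_eq (days : List String) : ∀ (l : List String) (s : PySem.Set String) (out : List String),
    l.Nodup → (∀ d ∈ l, d ∉ s) →
    (l.foldl (fun (st : PySem.Set String × List String) d =>
        if days.contains d && !(PySem.Set.contains st.1 d)
        then (PySem.Set.add st.1 d, st.2 ++ [d])
        else st) (s, out)).2 = out ++ l.filter (fun d => days.contains d) := by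
  intro l
  induction l with
  | nil => intro s out _ _; simp
  | cons d t ih =>
    intro s out hnd hdisj
    rw [List.foldl_cons, List.filter_cons]
    by_cases hc : days.contains d = true
    · have hdm : d ∈ days := by simpa using hc
      rw [if_pos (by simpa using And.intro hdm (hdisj d (List.mem_cons_self ..))), if_pos hc]
      rw [ih (PySem.Set.add s d) (out ++ [d]) hnd.of_cons]
      · simp
      · intro x hx
        rw [PySem.Set.mem_add]
        rintro (h | rfl)
        · exact hdisj x (List.mem_cons_of_mem _ hx) h
        · exact (List.nodup_cons.mp hnd).1 hx
    · simp only [Bool.not_eq_true] at hc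
      have hdm : d ∉ days := by simpa using hc
      rw [if_neg (by simp [hdm]), if_neg (by simp [hdm])]
      exact ih s out hnd.of_cons (fun x hx => hdisj x (List.mem_cons_of_mem _ hx))
lemma A_eq_target (days : List String) : canonicalize_days days = pvTarget days := by
  unfold canonicalize_days pvTarget
  rw [foldA_eq days pv_DAYS PySem.Set.empty [] (by decide) (by intro d _ h; simp [PySem.Set.empty] at h)]
  simp

lemma order_keys : pv_ORDER.keys = pv_DAYS := by decide

lemma order_contains (x : String) : pv_ORDER.contains x = true ↔ x ∈ pv_DAYS := by
  rw [PySem.Dict.contains_iff_mem_keys, order_keys]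

lemma B_eq_target (days : List String) : canonicalize_days_alt days = pvTarget days := by
  unfold canonicalize_days_alt
  apply PySem.List.sorted_eq_of_perm_of_pairwise_lt
  · rw [List.perm_ext_iff_of_nodup]
    · intro x
      simp only [PySem.Set.mem_ofList, List.mem_filter, pvTarget]
      constructor
      · rintro ⟨hx, hc⟩
        exact ⟨by simpa using hc, (order_contains x).mpr hx⟩
      · rintro ⟨hx, hc⟩
        exact ⟨(order_contains x).mp hc, by simpa using hx⟩
    · exact List.Nodup.filter _ (by decide)
    · exact PySem.Set.nodup_ofList _
  · exact List.Pairwise.sublist (List.filter_sublist (l := pv_DAYS)) (by decide)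

-- ===== VERDICT (by name: the statement is the Claim_ definition above) =====
theorem canonicalize_days_spec : Claim_equal_canonicalize_days := by
  intro days _
  unfold Spec_canonicalize_days
  rw [A_eq_target, B_eq_target]
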